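-- pv_equiv track=rewrite | github.com/harshvardhanraju/next_click_predictor | cloudrun_app.py | determine_element_type
-- ===== SOURCE A (Python) =====
-- def determine_element_type(task_description: str, device_type: str) -> tuple:
--     """Determine most likely element type based on task"""
--     task_lower = task_description.lower()
--
--     if any(word in task_lower for word in ["submit", "send", "confirm", "buy", "purchase"]):
--         return ("BUTTON", "Submit" if device_type == "desktop" else "Submit")
--     elif any(word in task_lower for word in ["search", "find", "look"]):
--         return ("INPUT", "Search")
--     elif any(word in task_lower for word in ["click", "select", "choose"]):
--         return ("BUTTON", "Continue")
--     elif any(word in task_lower for word in ["read", "view", "see"]):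
--         return ("LINK", "Read More")
--     else:
--         return ("BUTTON", "Next")
-- ===== SOURCE B (Python) =====
-- # Position-scan classifier: instead of running a substring search per keyword
-- # group, scan the lowercased string once; at every position try all keywords
-- # and keep the smallest (highest-priority) matching group index.
--
-- _KEYWORDS = [
--     ("submit", 0), ("send", 0), ("confirm", 0), ("buy", 0), ("purchase", 0),
--     ("search", 1), ("find", 1), ("look", 1),
--     ("click", 2), ("select", 2), ("choose", 2),
--     ("read", 3), ("view", 3), ("see", 3),
-- ]
--
-- _RESULTS = [
--     ("BUTTON", "Submit"),
--     ("INPUT", "Search"),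
--     ("BUTTON", "Continue"),
--     ("LINK", "Read More"),
--     ("BUTTON", "Next"),
-- ]
--
-- def determine_element_type(task_description: str, device_type: str) -> tuple:
--     """Determine most likely element type based on task (single position scan)."""
--     t = task_description.lower()
--     best = len(_RESULTS) - 1
--     for i in range(len(t)):
--         for word, group in _KEYWORDS:
--             if group < best and t.startswith(word, i):
--                 best = group
--     return _RESULTS[best]
-- ===== Notes on version B (the rewrite author's own statement) =====
-- stated objective: alternative
-- what changed: Replaces the per-group if-elif of substring searches with a single left-to-right scan of the lowercased string that tries every keyword at each position and keeps the minimum (highest-priority) matching group index, then indexes a results table; the redundant device_type ternary (both arms 'Submit') disappears.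
import Mathlib
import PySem

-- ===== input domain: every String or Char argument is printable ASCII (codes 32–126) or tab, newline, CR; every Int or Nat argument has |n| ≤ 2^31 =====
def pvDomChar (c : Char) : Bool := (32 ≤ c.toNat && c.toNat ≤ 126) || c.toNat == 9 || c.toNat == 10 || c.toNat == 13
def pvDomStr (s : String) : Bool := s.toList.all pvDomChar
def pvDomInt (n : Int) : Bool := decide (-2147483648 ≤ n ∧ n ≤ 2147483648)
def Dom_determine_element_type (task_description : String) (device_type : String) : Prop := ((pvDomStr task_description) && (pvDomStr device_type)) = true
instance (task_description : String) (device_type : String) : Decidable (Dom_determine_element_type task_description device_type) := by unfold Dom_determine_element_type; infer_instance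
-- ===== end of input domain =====

-- B replaces A's if-elif cascade of per-keyword substring searches by a single
-- position scan of the lowercased string keeping the minimum matching group
-- index, then a results-table lookup (alternative algorithm; no speed claimed).


-- ===== PORT A =====
def determine_element_type (task_description : String) (device_type : String) : String × String :=
  let task_lower := PySem.Str.lower task_description
  if (["submit", "send", "confirm", "buy", "purchase"].any (fun word => PySem.Str.isIn word task_lower)) then
    ("BUTTON", if device_type == "desktop" then "Submit" else "Submit")
  else if (["search", "find", "look"].any (fun word => PySem.Str.isIn word task_lower)) then
    ("INPUT", "Search")
  else if (["click", "select", "choose"].any (fun word => PySem.Str.isIn word task_lower)) then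
    ("BUTTON", "Continue")
  else if (["read", "view", "see"].any (fun word => PySem.Str.isIn word task_lower)) then
    ("LINK", "Read More")
  else
    ("BUTTON", "Next")

-- ===== PORT B =====
def detKeywords : List (String × Nat) :=
  [ ("submit", 0), ("send", 0), ("confirm", 0), ("buy", 0), ("purchase", 0),
    ("search", 1), ("find", 1), ("look", 1),
    ("click", 2), ("select", 2), ("choose", 2),
    ("read", 3), ("view", 3), ("see", 3) ]

def detResults : List (String × String) :=
  [ ("BUTTON", "Submit"), ("INPUT", "Search"), ("BUTTON", "Continue"),
    ("LINK", "Read More"), ("BUTTON", "Next") ]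

-- exact port of Python's t.startswith(word, i) for 0 ≤ i ≤ len(t) (the only i the loop uses)
def detStartsAt (t : List Char) (w : String) (i : Nat) : Bool := w.toList.isPrefixOf (t.drop i)

def determine_element_type_alt (task_description : String) (device_type : String) : String × String :=
  let t := PySem.Chars.lower task_description.toList
  let best := (List.range t.length).foldl
    (fun best i => detKeywords.foldl
      (fun best wg => if wg.2 < best && detStartsAt t wg.1 i then wg.2 else best) best)
    (detResults.length - 1)
  detResults.getD best ("BUTTON", "Next")

-- ===== PRECONDITION & SPEC =====
def Spec_determine_element_type (task_description : String) (device_type : String) (out : String × String) : Prop := out = determine_element_type_alt task_description device_type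
instance (task_description : String) (device_type : String) (out : String × String) : Decidable (Spec_determine_element_type task_description device_type out) := by unfold Spec_determine_element_type; infer_instance

-- ===== CLAIM (what is proved, stated in full; the proofs are below) =====
def Claim_equal_determine_element_type : Prop := ∀ (task_description : String) (device_type : String), Dom_determine_element_type task_description device_type → Spec_determine_element_type task_description device_type (determine_element_type task_description device_type)

-- ===== LEMMAS AND PROOFS =====

-- all group indices matched at some position of t, in scan order
def detCands (t : List Char) : List Nat :=
  (List.range t.length).flatMap
    (fun i => (detKeywords.filter (fun wg => detStartsAt t wg.1 i)).map (·.2))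

lemma inner_foldl_eq_min (t : List Char) (i : Nat) (kws : List (String × Nat)) : ∀ (b : Nat),
    kws.foldl (fun b wg => if wg.2 < b && detStartsAt t wg.1 i then wg.2 else b) b
      = ((kws.filter (fun wg => detStartsAt t wg.1 i)).map (·.2)).foldl min b := by
  induction kws with
  | nil => intro b; rfl
  | cons wg rest ih =>
      intro b
      by_cases hs : detStartsAt t wg.1 i = true
      · rw [List.foldl_cons]
        simp only [List.filter_cons, hs, if_true, List.map_cons, List.foldl_cons]
        rw [ih]
        congr 1
        simp only [Bool.and_true, decide_eq_true_eq]
        rw [Nat.min_def]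
        split_ifs <;> omega
      · rw [List.foldl_cons]
        simp only [List.filter_cons, hs, Bool.false_eq_true, if_false]
        rw [ih]
        congr 1
        simp

lemma best_eq_foldl_min (t : List Char) (b0 : Nat) :
    (List.range t.length).foldl
      (fun b i => detKeywords.foldl
        (fun b wg => if wg.2 < b && detStartsAt t wg.1 i then wg.2 else b) b) b0
      = (detCands t).foldl min b0 := by
  unfold detCands
  rw [List.flatMap_def, List.foldl_flatten, List.foldl_map]
  simp only [inner_foldl_eq_min]

lemma startsAt_exists_iff (t : List Char) (w : String) (hw : w.toList ≠ []) :
    (∃ i < t.length, detStartsAt t w i = true) ↔ PySem.Chars.isIn w.toList t = true := by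
  rw [← PySem.Chars.exists_prefix_drop_iff_isIn]
  constructor
  · rintro ⟨i, _, h⟩
    exact ⟨i, List.isPrefixOf_iff_prefix.mp h⟩
  · rintro ⟨j, h⟩
    by_cases hj : j < t.length
    · exact ⟨j, hj, List.isPrefixOf_iff_prefix.mpr h⟩
    · rw [List.drop_eq_nil_of_le (by omega)] at h
      exact absurd (List.prefix_nil.mp h) hw

lemma mem_detCands_iff (t : List Char) (g : Nat) :
    g ∈ detCands t ↔ ∃ wg ∈ detKeywords, wg.2 = g ∧ ∃ i < t.length, detStartsAt t wg.1 i = true := by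
  simp only [detCands, List.mem_flatMap, List.mem_range, List.mem_map, List.mem_filter]
  constructor
  · rintro ⟨i, hi, wg, ⟨hmem, hs⟩, hg⟩
    exact ⟨wg, hmem, hg, i, hi, hs⟩
  · rintro ⟨wg, hmem, hg, i, hi, hs⟩
    exact ⟨i, hi, wg, ⟨hmem, hs⟩, hg⟩

lemma detCands_lt_four {t : List Char} {g : Nat} (h : g ∈ detCands t) : g < 4 := by
  rw [mem_detCands_iff] at h
  obtain ⟨wg, hmem, hg, -⟩ := h
  have h4 : ∀ wg ∈ detKeywords, wg.2 < 4 := by decide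
  exact hg ▸ h4 wg hmem

lemma mem_detCands_zero (t : List Char) :
    (0 ∈ detCands t) ↔
      ((∃ i < t.length, detStartsAt t "submit" i = true) ∨ (∃ i < t.length, detStartsAt t "send" i = true) ∨ (∃ i < t.length, detStartsAt t "confirm" i = true) ∨ (∃ i < t.length, detStartsAt t "buy" i = true) ∨ (∃ i < t.length, detStartsAt t "purchase" i = true)) := by
  rw [mem_detCands_iff]
  constructor
  · rintro ⟨wg, hmem, hg, hex⟩
    simp only [detKeywords, List.mem_cons, List.not_mem_nil, or_false] at hmem
    rcases hmem with h|h|h|h|h|h|h|h|h|h|h|h|h|h <;> subst h <;> dsimp only at hg hex <;>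
      first
        | exact absurd hg (by decide)
        | exact Or.inl hex
        | exact Or.inr (Or.inl hex)
        | exact Or.inr (Or.inr (Or.inl hex))
        | exact Or.inr (Or.inr (Or.inr (Or.inl hex)))
        | exact Or.inr (Or.inr (Or.inr (Or.inr hex)))
  · intro h
    rcases h with h|h|h|h|h
    · exact ⟨("submit", 0), by simp [detKeywords], rfl, h⟩
    · exact ⟨("send", 0), by simp [detKeywords], rfl, h⟩
    · exact ⟨("confirm", 0), by simp [detKeywords], rfl, h⟩
    · exact ⟨("buy", 0), by simp [detKeywords], rfl, h⟩
    · exact ⟨("purchase", 0), by simp [detKeywords], rfl, h⟩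

lemma mem_detCands_one (t : List Char) :
    (1 ∈ detCands t) ↔
      ((∃ i < t.length, detStartsAt t "search" i = true) ∨ (∃ i < t.length, detStartsAt t "find" i = true) ∨ (∃ i < t.length, detStartsAt t "look" i = true)) := by
  rw [mem_detCands_iff]
  constructor
  · rintro ⟨wg, hmem, hg, hex⟩
    simp only [detKeywords, List.mem_cons, List.not_mem_nil, or_false] at hmem
    rcases hmem with h|h|h|h|h|h|h|h|h|h|h|h|h|h <;> subst h <;> dsimp only at hg hex <;>
      first
        | exact absurd hg (by decide)
        | exact Or.inl hex
        | exact Or.inr (Or.inl hex)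
        | exact Or.inr (Or.inr hex)
  · intro h
    rcases h with h|h|h
    · exact ⟨("search", 1), by simp [detKeywords], rfl, h⟩
    · exact ⟨("find", 1), by simp [detKeywords], rfl, h⟩
    · exact ⟨("look", 1), by simp [detKeywords], rfl, h⟩

lemma mem_detCands_two (t : List Char) :
    (2 ∈ detCands t) ↔
      ((∃ i < t.length, detStartsAt t "click" i = true) ∨ (∃ i < t.length, detStartsAt t "select" i = true) ∨ (∃ i < t.length, detStartsAt t "choose" i = true)) := by
  rw [mem_detCands_iff]
  constructor
  · rintro ⟨wg, hmem, hg, hex⟩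
    simp only [detKeywords, List.mem_cons, List.not_mem_nil, or_false] at hmem
    rcases hmem with h|h|h|h|h|h|h|h|h|h|h|h|h|h <;> subst h <;> dsimp only at hg hex <;>
      first
        | exact absurd hg (by decide)
        | exact Or.inl hex
        | exact Or.inr (Or.inl hex)
        | exact Or.inr (Or.inr hex)
  · intro h
    rcases h with h|h|h
    · exact ⟨("click", 2), by simp [detKeywords], rfl, h⟩
    · exact ⟨("select", 2), by simp [detKeywords], rfl, h⟩
    · exact ⟨("choose", 2), by simp [detKeywords], rfl, h⟩

lemma mem_detCands_three (t : List Char) :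
    (3 ∈ detCands t) ↔
      ((∃ i < t.length, detStartsAt t "read" i = true) ∨ (∃ i < t.length, detStartsAt t "view" i = true) ∨ (∃ i < t.length, detStartsAt t "see" i = true)) := by
  rw [mem_detCands_iff]
  constructor
  · rintro ⟨wg, hmem, hg, hex⟩
    simp only [detKeywords, List.mem_cons, List.not_mem_nil, or_false] at hmem
    rcases hmem with h|h|h|h|h|h|h|h|h|h|h|h|h|h <;> subst h <;> dsimp only at hg hex <;>
      first
        | exact absurd hg (by decide)
        | exact Or.inl hex
        | exact Or.inr (Or.inl hex)
        | exact Or.inr (Or.inr hex)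
  · intro h
    rcases h with h|h|h
    · exact ⟨("read", 3), by simp [detKeywords], rfl, h⟩
    · exact ⟨("view", 3), by simp [detKeywords], rfl, h⟩
    · exact ⟨("see", 3), by simp [detKeywords], rfl, h⟩

-- ===== VERDICT (by name: the statement is the Claim_ definition above) =====
theorem determine_element_type_spec : Claim_equal_determine_element_type := by
  intro td dt _
  unfold Spec_determine_element_type determine_element_type determine_element_type_alt
  simp only [List.any_cons, List.any_nil, Bool.or_false, PySem.Str.isIn_eq,
    PySem.Str.toList_lower, Bool.or_eq_true]
  set t := PySem.Chars.lower td.toList with ht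
  rw [best_eq_foldl_min t (detResults.length - 1)]
  show _ = detResults.getD ((detCands t).foldl min 4) ("BUTTON", "Next")
  have hmin := (PySem.List.foldl_min_le (detCands t) 4).2
  have hmem := PySem.List.foldl_min_mem (detCands t) 4
  set r := (detCands t).foldl min 4 with hr
  have c0 := mem_detCands_zero t
  have c1 := mem_detCands_one t
  have c2 := mem_detCands_two t
  have c3 := mem_detCands_three t
  rw [startsAt_exists_iff t "submit" (by decide), startsAt_exists_iff t "send" (by decide),
    startsAt_exists_iff t "confirm" (by decide), startsAt_exists_iff t "buy" (by decide),
    startsAt_exists_iff t "purchase" (by decide)] at c0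
  rw [startsAt_exists_iff t "search" (by decide), startsAt_exists_iff t "find" (by decide),
    startsAt_exists_iff t "look" (by decide)] at c1
  rw [startsAt_exists_iff t "click" (by decide), startsAt_exists_iff t "select" (by decide),
    startsAt_exists_iff t "choose" (by decide)] at c2
  rw [startsAt_exists_iff t "read" (by decide), startsAt_exists_iff t "view" (by decide),
    startsAt_exists_iff t "see" (by decide)] at c3
  have hne : ∀ g : Nat, g < 4 → g ∉ detCands t → r ≠ g := by
    intro g hg4 hg heq
    rcases hmem with hm | hm
    · omega
    · exact hg (heq ▸ hm)
  by_cases h0 : 0 ∈ detCands t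
  · have hr0 : r = 0 := Nat.le_zero.mp (hmin 0 h0)
    rw [if_pos (c0.mp h0), hr0]
    simp [detResults]
  · rw [if_neg (fun hd => h0 (c0.mpr hd))]
    by_cases h1 : 1 ∈ detCands t
    · have hr1 : r = 1 := by have := hmin 1 h1; have := hne 0 (by omega) h0; omega
      rw [if_pos (c1.mp h1), hr1]
      rfl
    · rw [if_neg (fun hd => h1 (c1.mpr hd))]
      by_cases h2 : 2 ∈ detCands t
      · have hr2 : r = 2 := by
          have := hmin 2 h2; have := hne 0 (by omega) h0; have := hne 1 (by omega) h1; omega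
        rw [if_pos (c2.mp h2), hr2]
        rfl
      · rw [if_neg (fun hd => h2 (c2.mpr hd))]
        by_cases h3 : 3 ∈ detCands t
        · have hr3 : r = 3 := by
            have := hmin 3 h3; have := hne 0 (by omega) h0; have := hne 1 (by omega) h1; have := hne 2 (by omega) h2; omega
          rw [if_pos (c3.mp h3), hr3]
          rfl
        · have hr4 : r = 4 := by
            rcases hmem with hm | hm
            · exact hm
            · have hlt := detCands_lt_four hm
              interval_cases r
              · exact absurd hm h0
              · exact absurd hm h1
              · exact absurd hm h2
              · exact absurd hm h3
          rw [if_neg (fun hd => h3 (c3.mpr hd)), hr4]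
          rfl
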